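-- pv_equiv track=rewrite | github.com/alexandraback/datacollection | solutions_5738606668808192_1/Python/musicman3320/jamcoin.py | TestJamCoin
-- ===== SOURCE A (Python) =====
-- import math
--
-- def TestJamCoin(jam):
-- 	ret = None
-- 	divisors = []
-- 	for base in range(2,11):
-- 		num = sum([jam[b]*(base**(b+1)) for b in range(len(jam))]) + 1 + (base**(len(jam)+1))
--
-- 		upper = min(100000,int(math.sqrt(num)))
-- 		div = 0
-- 		d = 2
--
-- 		while d <= upper:
-- 			if num % d == 0:
-- 				div = d
-- 				break
-- 			d = d + 1
--
-- 		if div == 0: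
-- 			break
--
-- 		divisors.append(str(div))
--
-- 	if len(divisors) == 9:
-- 		ret = "1" + "".join(reversed([str(jm) for jm in jam])) + "1 " + " ".join(divisors)
--
-- 	return ret
-- ===== SOURCE B (Python) =====
-- import math
--
-- # Prime table built once at import: all primes up to 100000, ascending
-- # (trial division up to isqrt; a separate table-building phase).
-- _PRIMES = [n for n in range(2, 100001)
--            if all(n % d for d in range(2, math.isqrt(n) + 1))]
--
--
-- def TestJamCoin(jam):
--     digits = "".join(str(jm) for jm in reversed(jam))
--     divisors = []
--     for base in range(2, 11):
--         # Horner evaluation of the interpretation of "1 jam-reversed 1" in `base`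
--         num = 1
--         for c in reversed(jam):
--             num = num * base + c
--         num = num * base + 1
--         upper = min(100000, math.isqrt(num))
--         div = 0
--         for p in _PRIMES:
--             if p > upper:
--                 break
--             if num % p == 0:
--                 div = p
--                 break
--         if div == 0:
--             return None
--         divisors.append(str(div))
--     return "1" + digits + "1 " + " ".join(divisors)
-- ===== Notes on version B (the rewrite author's own statement) =====
-- stated objective: alternative
-- what changed: B builds a prime table once at import (all primes up to 100000, ascending) and finds each base's divisor by scanning only primes up to min(100000, isqrt(num)) instead of trial-dividing by every integer 2..upper, and evaluates num by Horner's rule instead of summing explicit powers; intended as faster, measured 10.34x at n=256 (unconfirmed at larger sizes, where A leaves Pre_).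
-- outside the precondition, e.g. on TestJamCoin([11, -7]): A returns None, B returns None
import Mathlib
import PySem

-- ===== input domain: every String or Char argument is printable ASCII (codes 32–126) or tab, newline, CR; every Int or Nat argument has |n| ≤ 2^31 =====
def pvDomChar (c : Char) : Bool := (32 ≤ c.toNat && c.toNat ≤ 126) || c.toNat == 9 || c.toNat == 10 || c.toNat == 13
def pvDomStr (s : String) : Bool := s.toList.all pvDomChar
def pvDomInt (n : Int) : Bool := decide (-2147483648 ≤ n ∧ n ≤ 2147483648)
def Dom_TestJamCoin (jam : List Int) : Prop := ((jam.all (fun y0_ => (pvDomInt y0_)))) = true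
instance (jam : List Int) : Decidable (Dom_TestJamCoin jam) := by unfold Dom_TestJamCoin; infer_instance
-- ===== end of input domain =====

-- B replaces A's per-base trial-division loop 2..upper with a prime table built once
-- (all primes ≤ 100000, ascending) scanned in order, and computes num by Horner's rule
-- instead of summing explicit powers (objective: alternative).

-- ===== PORT A =====
-- the `while d <= upper` trial-division loop of A; returns the first divisor, else 0
def pvTrialA (num : Int) (upper : Nat) (d : Nat) : Nat :=
  if d ≤ upper then
    if PySem.Int.mod num (d : Int) = 0 then d
    else pvTrialA num upper (d + 1)
  else 0
termination_by upper + 1 - d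

-- A's num formula: sum([jam[b]*(base**(b+1)) for b in range(len(jam))]) + 1 + base**(len(jam)+1)
-- (jam[b] with b always in range, hence getD)
def pvNumA (jam : List Int) (base : Int) : Int :=
  ((List.range jam.length).map (fun b => jam.getD b 0 * base ^ (b + 1))).sum
    + 1 + base ^ (jam.length + 1)

-- the `for base in range(2,11)` loop with its `break`: returns the divisors list
-- (a break just stops the loop; the length test happens afterwards).
-- upper = int(math.sqrt(num)): exact as Nat.sqrt for every 0 ≤ num admitted by Pre_
-- (below the float-overflow bound the float sqrt floors to isqrt wherever min(100000,·) can see it).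
def pvBasesA (jam : List Int) : List Int → List String → List String
  | [], divs => divs
  | base :: rest, divs =>
    let num := pvNumA jam base
    let upper := min 100000 (Nat.sqrt num.toNat)
    let dv := pvTrialA num upper 2
    if dv = 0 then divs
    else pvBasesA jam rest (divs ++ [PySem.Int.toStr (dv : Int)])

def TestJamCoin (jam : List Int) : Option String :=
  let divisors := pvBasesA jam [2, 3, 4, 5, 6, 7, 8, 9, 10] []
  if divisors.length = 9 then
    some ("1" ++ PySem.Str.join "" ((jam.map (fun jm => PySem.Int.toStr jm)).reverse)
      ++ "1 " ++ PySem.Str.join " " divisors)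
  else none

-- ===== PORT B =====
-- _PRIMES: all n in range(2,100001) with all(n % d for d in range(2, isqrt(n)+1)), ascending
def pvPrimesB : List Nat :=
  (List.range' 2 99999 1).filter
    (fun n => (List.range' 2 (Nat.sqrt n - 1) 1).all (fun d => n % d != 0))

-- B's scan of the prime table: break with 0 past upper, else first prime divisor
def pvScanB (num : Int) (upper : Nat) : List Nat → Nat
  | [] => 0
  | p :: ps =>
    if upper < p then 0
    else if PySem.Int.mod num (p : Int) = 0 then p
    else pvScanB num upper ps

-- Horner: num = 1; for c in reversed(jam): num = num*base + c; num = num*base + 1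
def pvHornerB (jam : List Int) (base : Int) : Int :=
  (jam.reverse.foldl (fun acc c => acc * base + c) 1) * base + 1

-- upper = math.isqrt(num): Nat.sqrt on num.toNat (Pre_ keeps num ≥ 0, where Python isqrt returns)
def pvBasesB (jam : List Int) : List Int → List String → Option (List String)
  | [], divs => some divs
  | base :: rest, divs =>
    let num := pvHornerB jam base
    let upper := min 100000 (Nat.sqrt num.toNat)
    let dv := pvScanB num upper pvPrimesB
    if dv = 0 then none
    else pvBasesB jam rest (divs ++ [PySem.Int.toStr (dv : Int)])

def TestJamCoin_alt (jam : List Int) : Option String :=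
  let digits := PySem.Str.join "" (jam.reverse.map (fun jm => PySem.Int.toStr jm))
  match pvBasesB jam [2, 3, 4, 5, 6, 7, 8, 9, 10] [] with
  | none => none
  | some divs => some ("1" ++ digits ++ "1 " ++ PySem.Str.join " " divs)

-- ===== PRECONDITION & SPEC =====
-- Pre_ excludes inputs on which some base's num is negative (math.sqrt raises ValueError)
-- or ≥ 2^1024 - 2^970 (float conversion overflows, math.sqrt raises OverflowError); it
-- excludes them for all nine bases at once, so it also drops inputs where A's search
-- happens to break (returning None) at an earlier base than the offending one.
-- the numeral below is 2^1024 - 2^970, the first integer float(num) overflows at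
def Pre_TestJamCoin (jam : List Int) : Prop :=
  ∀ base ∈ ([2, 3, 4, 5, 6, 7, 8, 9, 10] : List Int),
    0 ≤ ((List.range jam.length).map (fun b => jam.getD b 0 * base ^ (b + 1))).sum
        + 1 + base ^ (jam.length + 1)
      ∧ ((List.range jam.length).map (fun b => jam.getD b 0 * base ^ (b + 1))).sum
        + 1 + base ^ (jam.length + 1) < 179769313486231580793728971405303415079934132710037826936173778980444968292764750946649017977587207096330286416692887910946555547851940402630657488671505820681908902000708383676273854845817711531764475730270069855571366959622842914819860834936475292719074168444365510704342711559699508093042880177904174497792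

instance (jam : List Int) : Decidable (Pre_TestJamCoin jam) := by
  unfold Pre_TestJamCoin; infer_instance

def pvWitness_TestJamCoin : List Int := [1, 0]

def Spec_TestJamCoin (jam : List Int) (out : Option String) : Prop := out = TestJamCoin_alt jam
instance (jam : List Int) (out : Option String) : Decidable (Spec_TestJamCoin jam out) := by
  unfold Spec_TestJamCoin; infer_instance

-- ===== CLAIM (what is proved, stated in full; the proofs are below) =====
def Claim_equal_TestJamCoin : Prop :=
  ∀ (jam : List Int), Dom_TestJamCoin jam → Pre_TestJamCoin jam →
    Spec_TestJamCoin jam (TestJamCoin jam)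

-- ===== LEMMAS AND PROOFS =====

-- polynomial value Σ l[i] * base^i, recursively
def pvPolyval (base : Int) : List Int → Int
  | [] => 0
  | c :: t => c + base * pvPolyval base t

theorem pvSum_eq (base : Int) (l : List Int) : ∀ (k : Nat),
    ((List.range l.length).map (fun b => l.getD b 0 * base ^ (b + k))).sum
      = base ^ k * pvPolyval base l := by
  induction l with
  | nil => intro k; simp [pvPolyval]
  | cons c t ih =>
    intro k
    rw [List.length_cons, List.range_succ_eq_map, List.map_cons, List.map_map]
    have : ((List.range t.length).map
        ((fun b => (c :: t).getD b 0 * base ^ (b + k)) ∘ Nat.succ)).sum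
        = ((List.range t.length).map (fun b => t.getD b 0 * base ^ (b + (k + 1)))).sum := by
      congr 1
      apply List.map_congr_left
      intro b _
      show (c :: t).getD (b + 1) 0 * base ^ (b + 1 + k) = t.getD b 0 * base ^ (b + (k + 1))
      rw [List.getD_cons_succ]
      ring
    rw [List.sum_cons, this, ih (k + 1)]
    simp [pvPolyval]
    ring

theorem pvHorner_val (base : Int) (l : List Int) :
    l.reverse.foldl (fun acc c => acc * base + c) 1 = base ^ l.length + pvPolyval base l := by
  rw [List.foldl_reverse]
  induction l with
  | nil => simp [pvPolyval]
  | cons c t ih => simp [List.foldr_cons, ih, pvPolyval]; ring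

theorem pvNum_eq (jam : List Int) (base : Int) : pvNumA jam base = pvHornerB jam base := by
  unfold pvNumA pvHornerB
  rw [pvSum_eq base jam 1, pvHorner_val]
  ring

-- A's while loop is "first element of range(d, upper+1) dividing num, else 0"
theorem pvTrialA_find (num : Int) (upper : Nat) : ∀ (n d : Nat), upper + 1 - d = n →
    pvTrialA num upper d
      = ((List.range' d n 1).find? (fun (k : Nat) => decide (PySem.Int.mod num (k : Int) = 0))).getD 0 := by
  intro n
  induction n with
  | zero =>
    intro d hd
    rw [pvTrialA, if_neg (by omega)]
    simp
  | succ m ih =>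
    intro d hd
    rw [pvTrialA, if_pos (by omega), List.range'_succ, List.find?_cons]
    by_cases h : PySem.Int.mod num (d : Int) = 0
    · simp [h]
    · rw [if_neg h, ih (d + 1) (by omega)]
      simp [h]

-- B's scan of a strictly increasing list is "first element ≤ upper dividing num, else 0"
theorem pvScanB_find (num : Int) (upper : Nat) : ∀ (l : List Nat), l.Pairwise (· < ·) →
    pvScanB num upper l
      = ((l.find? (fun p => decide (p ≤ upper) && decide (PySem.Int.mod num (p : Int) = 0))).getD 0) := by
  intro l
  induction l with
  | nil => intro _; simp [pvScanB]
  | cons p ps ih =>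
    intro hpw
    rw [List.pairwise_cons] at hpw
    rw [pvScanB, List.find?_cons]
    by_cases hup : upper < p
    · rw [if_pos hup]
      have h1 : (decide (p ≤ upper) && decide (PySem.Int.mod num (p : Int) = 0)) = false := by
        simp; omega
      rw [h1]
      have h2 : ps.find? (fun q => decide (q ≤ upper) && decide (PySem.Int.mod num (q : Int) = 0)) = none := by
        rw [List.find?_eq_none]
        intro q hq
        have := hpw.1 q hq
        simp
        omega
      simp [h2]
    · rw [if_neg hup]
      by_cases hm : PySem.Int.mod num (p : Int) = 0
      · have : (decide (p ≤ upper) && decide (PySem.Int.mod num (p : Int) = 0)) = true := by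
          simp [hm]; omega
        rw [if_pos hm, this]
        simp
      · have : (decide (p ≤ upper) && decide (PySem.Int.mod num (p : Int) = 0)) = false := by
          simp [hm]
        rw [if_neg hm, this, ih hpw.2]

-- the prime table is exactly the primes ≤ 100000
theorem pvPrimesB_mem (p : Nat) : p ∈ pvPrimesB ↔ p.Prime ∧ p ≤ 100000 := by
  unfold pvPrimesB
  rw [List.mem_filter, List.mem_range'_1, List.all_eq_true]
  constructor
  · rintro ⟨⟨h2, hlt⟩, hall⟩
    refine ⟨Nat.prime_def_le_sqrt.mpr ⟨h2, ?_⟩, by omega⟩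
    intro m hm2 hmsq hdvd
    have hmem : m ∈ List.range' 2 (Nat.sqrt p - 1) 1 := by
      rw [List.mem_range'_1]
      have : 1 ≤ Nat.sqrt p := Nat.le_sqrt.mpr (by omega)
      omega
    have := hall m hmem
    simp at this
    exact this (Nat.dvd_iff_mod_eq_zero.mp hdvd)
  · rintro ⟨hp, hle⟩
    have h2 := hp.two_le
    refine ⟨⟨h2, by omega⟩, ?_⟩
    intro d hd
    rw [List.mem_range'_1] at hd
    simp
    intro hmod
    have hdvd : d ∣ p := Nat.dvd_iff_mod_eq_zero.mpr hmod
    exact (Nat.prime_def_le_sqrt.mp hp).2 d hd.1 (by omega) hdvd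

theorem pvPrimesB_sorted : pvPrimesB.Pairwise (· < ·) :=
  (List.pairwise_lt_range' 1).filter _

-- on a strictly increasing list, find? returns m when m is in the list, satisfies the
-- predicate, and every satisfying element is ≥ m
theorem pvFind_first {l : List Nat} {pred : Nat → Bool} {m : Nat}
    (hs : l.Pairwise (· < ·)) (hmem : m ∈ l) (hpm : pred m = true)
    (hmin : ∀ x ∈ l, pred x = true → m ≤ x) : l.find? pred = some m := by
  induction l with
  | nil => cases hmem
  | cons x xs ih =>
    rw [List.pairwise_cons] at hs
    rw [List.find?_cons]
    by_cases hx : x = m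
    · subst hx; rw [hpm]
    · have hmtail : m ∈ xs := by
        rcases List.mem_cons.mp hmem with h | h
        · exact absurd h.symm hx
        · exact h
      have hxm : x < m := hs.1 m hmtail
      have hpx : pred x = false := by
        by_contra hc
        have := hmin x List.mem_cons_self (by simpa using hc)
        omega
      rw [hpx]
      exact ih hs.2 hmtail (fun y hy hpy => hmin y (List.mem_cons_of_mem x hy) hpy)

-- per-base: A's trial division from 2 equals B's prime-table scan
theorem pvDiv_eq (num : Int) (hnum : 0 ≤ num) (upper : Nat) (hup : upper ≤ 100000) :
    pvTrialA num upper 2 = pvScanB num upper pvPrimesB := by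
  have hdvd : ∀ k : Nat, 0 < k → (PySem.Int.mod num (k : Int) = 0 ↔ k ∣ num.toNat) := by
    intro k hk
    rw [PySem.Int.mod_eq_zero_iff_dvd]
    constructor
    · intro h
      have : (k : Int) ∣ (num.toNat : Int) := by rwa [Int.toNat_of_nonneg hnum]
      exact_mod_cast this
    · intro h
      have : (k : Int) ∣ (num.toNat : Int) := by exact_mod_cast h
      rwa [Int.toNat_of_nonneg hnum] at this
  rw [pvTrialA_find num upper (upper + 1 - 2) 2 rfl,
    pvScanB_find num upper pvPrimesB pvPrimesB_sorted]
  by_cases hex : ∃ d : Nat, 2 ≤ d ∧ d ≤ upper ∧ d ∣ num.toNat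
  · -- the least such divisor is prime, and both scans find exactly it
    have hm2 := (Nat.find_spec hex).1
    have hmu := (Nat.find_spec hex).2.1
    have hmd := (Nat.find_spec hex).2.2
    set m := Nat.find hex with hmdef
    have hmin : ∀ x : Nat, 2 ≤ x → x ≤ upper → x ∣ num.toNat → m ≤ x := by
      intro x h1 h2 h3
      exact Nat.find_min' hex ⟨h1, h2, h3⟩
    have hmp : m.Prime := by
      rw [Nat.prime_def_lt']
      refine ⟨hm2, ?_⟩
      intro a ha2 ham hdva
      have : m ≤ a := hmin a ha2 (by omega) (hdva.trans hmd)
      omega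
    have hf1 : (List.range' 2 (upper + 1 - 2) 1).find?
        (fun (k : Nat) => decide (PySem.Int.mod num (k : Int) = 0)) = some m := by
      apply pvFind_first (List.pairwise_lt_range' 1)
      · rw [List.mem_range'_1]; omega
      · simp [(hdvd m (by omega)).mpr hmd]
      · intro x hx hpx
        rw [List.mem_range'_1] at hx
        simp only [decide_eq_true_eq] at hpx
        exact hmin x hx.1 (by omega) ((hdvd x (by omega)).mp hpx)
    have hf2 : pvPrimesB.find?
        (fun p => decide (p ≤ upper) && decide (PySem.Int.mod num (p : Int) = 0)) = some m := by
      apply pvFind_first pvPrimesB_sorted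
      · exact (pvPrimesB_mem m).mpr ⟨hmp, by omega⟩
      · simp [(hdvd m (by omega)).mpr hmd, hmu]
      · intro x hx hpx
        have hx2 := ((pvPrimesB_mem x).mp hx).1.two_le
        simp only [Bool.and_eq_true, decide_eq_true_eq] at hpx
        exact hmin x hx2 hpx.1 ((hdvd x (by omega)).mp hpx.2)
    rw [hf1, hf2]
  · push_neg at hex
    have hf1 : (List.range' 2 (upper + 1 - 2) 1).find?
        (fun (k : Nat) => decide (PySem.Int.mod num (k : Int) = 0)) = none := by
      rw [List.find?_eq_none]
      intro k hk
      rw [List.mem_range'_1] at hk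
      simp only [decide_eq_true_eq]
      intro hmod
      exact hex k hk.1 (by omega) ((hdvd k (by omega)).mp hmod)
    have hf2 : pvPrimesB.find?
        (fun p => decide (p ≤ upper) && decide (PySem.Int.mod num (p : Int) = 0)) = none := by
      rw [List.find?_eq_none]
      intro p hp
      have hp2 := ((pvPrimesB_mem p).mp hp).1.two_le
      simp only [Bool.and_eq_true, decide_eq_true_eq, not_and]
      intro hpu hmod
      exact hex p hp2 hpu ((hdvd p (by omega)).mp hmod)
    rw [hf1, hf2]

-- the two base loops agree: B returns some iff A never broke (all bases appended)
theorem pvBases_eq (jam : List Int) : ∀ (bases : List Int) (divs : List String),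
    (∀ b ∈ bases, 0 ≤ pvNumA jam b) →
    pvBasesB jam bases divs =
      if (pvBasesA jam bases divs).length = divs.length + bases.length
      then some (pvBasesA jam bases divs) else none := by
  intro bases
  induction bases with
  | nil => intro divs _; simp [pvBasesA, pvBasesB]
  | cons b rest ih =>
    intro divs hnn
    have hb : 0 ≤ pvNumA jam b := hnn b List.mem_cons_self
    rw [pvBasesA, pvBasesB]
    simp only [← pvNum_eq jam b]
    rw [← pvDiv_eq (pvNumA jam b) hb _ (min_le_left _ _)]
    by_cases hz : pvTrialA (pvNumA jam b) (min 100000 (Nat.sqrt (pvNumA jam b).toNat)) 2 = 0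
    · rw [if_pos hz, if_pos hz, if_neg (by simp)]
    · set divs' := divs ++ [PySem.Int.toStr
        ((pvTrialA (pvNumA jam b) (min 100000 (Nat.sqrt (pvNumA jam b).toNat)) 2 : Nat) : Int)]
        with hdivs'
      rw [if_neg hz, if_neg hz,
        ih divs' (fun x hx => hnn x (List.mem_cons_of_mem b hx))]
      have hc : ((pvBasesA jam rest divs').length = divs'.length + rest.length)
          ↔ ((pvBasesA jam rest divs').length = divs.length + (rest.length + 1)) := by
        rw [hdivs']
        simp [List.length_append]
        omega
      rw [if_congr hc rfl rfl]
      rfl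

-- ===== VERDICT (by name: the statement is the Claim_ definition above) =====
theorem TestJamCoin_spec : Claim_equal_TestJamCoin := by
  intro jam _ hpre
  unfold Spec_TestJamCoin TestJamCoin TestJamCoin_alt
  have hnn : ∀ b ∈ ([2, 3, 4, 5, 6, 7, 8, 9, 10] : List Int), 0 ≤ pvNumA jam b :=
    fun b hb => (hpre b hb).1  -- Pre_'s bound is pvNumA jam b definitionally
  rw [pvBases_eq jam _ [] hnn]
  have hnine : ([] : List String).length + ([2, 3, 4, 5, 6, 7, 8, 9, 10] : List Int).length = 9 := by
    simp
  rw [hnine]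
  by_cases hlen : (pvBasesA jam [2, 3, 4, 5, 6, 7, 8, 9, 10] []).length = 9
  · rw [if_pos hlen, if_pos hlen]
    simp [List.map_reverse]
  · rw [if_neg hlen, if_neg hlen]
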